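-- pv_equiv track=rewrite | github.com/MunoMono/synthesis-and-mapping | scripts/draw.py | color_style
-- ===== SOURCE A (Python) =====
-- CARBON = {
--     "layer":  "#161616",
--     "border": "#393939",
--     "edge":   "#78a9ff"
-- }
--
-- def color_style(classes_list, classes_map):
--     if classes_list:
--         for c in classes_list:
--             if c in classes_map:
--                 cc = classes_map[c]
--                 return {
--                     "fillcolor": cc.get("fill")     or "#f4f4f4",
--                     "color":     cc.get("stroke")   or CARBON["border"],
--                     "fontcolor": cc.get("color")    or "#161616",
--                     "fontname":  cc.get("fontname"),
--                     "fontsize":  cc.get("fontsize"),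
--                 }
--     return {
--         "fillcolor": "#f4f4f4",
--         "color":     CARBON["border"],
--         "fontcolor": "#161616",
--         "fontname":  None,
--         "fontsize":  None
--     }
-- ===== SOURCE B (Python) =====
-- CARBON = {
--     "layer":  "#161616",
--     "border": "#393939",
--     "edge":   "#78a9ff"
-- }
--
-- def color_style(classes_list, classes_map):
--     # Traverse the class list BACK-TO-FRONT, letting each earlier class's
--     # mapping override later ones; the first listed match ends up winning
--     # without any early return, and the empty start mapping makes the
--     # no-match case fall out of the same single dict construction.
--     cc = {}
--     for c in reversed(classes_list or []):
--         cc = classes_map.get(c, cc)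
--     return {
--         "fillcolor": cc.get("fill")   or "#f4f4f4",
--         "color":     cc.get("stroke") or CARBON["border"],
--         "fontcolor": cc.get("color")  or "#161616",
--         "fontname":  cc.get("fontname"),
--         "fontsize":  cc.get("fontsize"),
--     }
-- ===== Notes on version B (the rewrite author's own statement) =====
-- stated objective: simpler
-- what changed: B traverses classes_list back-to-front with an override accumulator (classes_map.get(c, cc)) instead of A's forward scan with an early return, and builds one dict with or-defaults so A's duplicated default-dict literal disappears.
import Mathlib
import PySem

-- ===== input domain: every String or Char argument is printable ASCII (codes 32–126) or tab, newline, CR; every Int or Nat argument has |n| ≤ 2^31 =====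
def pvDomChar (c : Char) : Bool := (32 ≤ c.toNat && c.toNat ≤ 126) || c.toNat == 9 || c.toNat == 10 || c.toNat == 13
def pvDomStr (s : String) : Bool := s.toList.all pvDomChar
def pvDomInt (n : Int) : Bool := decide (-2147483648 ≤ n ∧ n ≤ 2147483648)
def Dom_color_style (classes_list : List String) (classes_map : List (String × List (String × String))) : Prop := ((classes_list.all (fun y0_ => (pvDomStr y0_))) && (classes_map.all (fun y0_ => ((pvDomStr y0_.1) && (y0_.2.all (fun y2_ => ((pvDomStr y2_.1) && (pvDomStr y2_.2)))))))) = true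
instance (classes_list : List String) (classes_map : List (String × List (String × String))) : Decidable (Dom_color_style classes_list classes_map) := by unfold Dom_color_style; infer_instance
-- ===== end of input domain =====

-- B traverses classes_list back-to-front with an override accumulator (no early return) and builds
-- ONE dict with 'or'-defaults, removing A's duplicated default-dict literal; return value only.

-- ===== PORT A =====
-- 'x or y' on a possibly-missing string: '' and None are falsy in Python
def pvOrStr (o : Option String) (d : String) : String :=
  match o with
  | some s => if s = "" then d else s
  | none => d

-- the for-loop: first class c with 'c in classes_map' yields the returned dict, else fall through
def pvLoopA (classes_map : List (String × List (String × String))) :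
    List String → Option (List (String × Option String))
  | [] => none
  | c :: rest =>
    match classes_map.lookup c with
    | some cc =>
      some [("fillcolor", some (pvOrStr (cc.lookup "fill") "#f4f4f4")),
            ("color",     some (pvOrStr (cc.lookup "stroke") "#393939")),
            ("fontcolor", some (pvOrStr (cc.lookup "color") "#161616")),
            ("fontname",  cc.lookup "fontname"),
            ("fontsize",  cc.lookup "fontsize")]
    | none => pvLoopA classes_map rest

-- the duplicated final 'return { … }' block of A
def pvDefaultA : List (String × Option String) :=
  [("fillcolor", some "#f4f4f4"), ("color", some "#393939"),
   ("fontcolor", some "#161616"), ("fontname", none), ("fontsize", none)]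

def color_style (classes_list : List String) (classes_map : List (String × List (String × String))) : List (String × Option String) :=
  if classes_list.isEmpty then pvDefaultA
  else
    match pvLoopA classes_map classes_list with
    | some r => r
    | none => pvDefaultA

-- ===== PORT B =====
-- 'for c in reversed(classes_list): cc = classes_map.get(c, cc)' starting from cc = {}
def color_style_alt (classes_list : List String) (classes_map : List (String × List (String × String))) : List (String × Option String) :=
  let cc := classes_list.reverse.foldl
    (fun acc c => match classes_map.lookup c with
                  | some v => v
                  | none => acc) ([] : List (String × String))
  [("fillcolor", some (pvOrStr (cc.lookup "fill") "#f4f4f4")),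
   ("color",     some (pvOrStr (cc.lookup "stroke") "#393939")),
   ("fontcolor", some (pvOrStr (cc.lookup "color") "#161616")),
   ("fontname",  cc.lookup "fontname"),
   ("fontsize",  cc.lookup "fontsize")]

-- ===== PRECONDITION & SPEC =====
def Spec_color_style (classes_list : List String) (classes_map : List (String × List (String × String))) (out : List (String × Option String)) : Prop := out = color_style_alt classes_list classes_map
instance (classes_list : List String) (classes_map : List (String × List (String × String))) (out : List (String × Option String)) : Decidable (Spec_color_style classes_list classes_map out) := by unfold Spec_color_style; infer_instance

-- ===== CLAIM =====
def Claim_equal_color_style : Prop := ∀ (classes_list : List String) (classes_map : List (String × List (String × String))), Dom_color_style classes_list classes_map → Spec_color_style classes_list classes_map (color_style classes_list classes_map)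

-- ===== LEMMAS AND PROOFS =====
-- the five-entry dict built from a class mapping cc
def pvBuild (cc : List (String × String)) : List (String × Option String) :=
  [("fillcolor", some (pvOrStr (cc.lookup "fill") "#f4f4f4")),
   ("color",     some (pvOrStr (cc.lookup "stroke") "#393939")),
   ("fontcolor", some (pvOrStr (cc.lookup "color") "#161616")),
   ("fontname",  cc.lookup "fontname"),
   ("fontsize",  cc.lookup "fontsize")]

-- B's backward override fold, as a foldr (override by earlier = first match wins)
lemma alt_eq_build_foldr (cl : List String) (cm : List (String × List (String × String))) :
    color_style_alt cl cm
      = pvBuild (cl.foldr (fun c acc => match cm.lookup c with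
                                        | some v => v
                                        | none => acc) []) := by
  simp [color_style_alt, pvBuild, List.foldl_reverse]

-- A's early-return loop agrees with the override fold's result
lemma loopA_eq_foldr (cm : List (String × List (String × String))) (cl : List String) :
    (match pvLoopA cm cl with
     | some r => r
     | none => pvDefaultA)
      = pvBuild (cl.foldr (fun c acc => match cm.lookup c with
                                        | some v => v
                                        | none => acc) []) := by
  induction cl with
  | nil => rfl
  | cons c rest ih =>
    simp only [pvLoopA, List.foldr_cons]
    cases cm.lookup c with
    | some cc => rfl
    | none => simpa using ih

-- ===== VERDICT =====
theorem color_style_spec : Claim_equal_color_style := by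
  intro cl cm _
  unfold Spec_color_style color_style
  rw [alt_eq_build_foldr]
  rcases cl with _ | ⟨c, rest⟩
  · rfl
  · simpa using loopA_eq_foldr cm (c :: rest)
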